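-- pv_equiv track=rewrite | github.com/hkleiner/JudgeMemo | Dataset_Creation/TextManipulation/utils.py | _get_char_ranges
-- ===== SOURCE A (Python) =====
-- def _get_char_ranges(ranges: list[str], delimiter: str, current_pos: int = 0) -> list[list[int]]:
--     """
--     Calculates the character index ranges for a list of text segments, accounting for delimiters.
--
--     This function iterates over a list of strings (e.g., paragraphs, tokens, sections), and returns
--     their character start and end positions in the full text. It assumes that the segments are joined
--     by a consistent delimiter, which is included in the position calculation.
--
--     Args:
--         ranges (list[str]):
--             The list of text segments (e.g., paragraphs or tokens) for which to compute character ranges.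
--         delimiter (str):
--             The delimiter string used to separate the segments in the original text (e.g., "\n\n").
--         current_pos (int, optional):
--             The starting character index of the first segment. Defaults to 0.
--
--     Returns:
--         list[list[int]]:
--             A list of [start, end] pairs representing the character ranges for each segment.
--             The `start` index is inclusive, and the `end` index is exclusive.
--     """
--     char_ranges = []
--
--     for range_content in ranges:
--         start_pos = current_pos
--         end_pos = start_pos + len(range_content)
--         char_ranges.append([start_pos, end_pos])
--
--         # update the current position to include the delimiter
--         current_pos = end_pos + len(delimiter)
--
--     # start = inclusive; end = exclusive
--     return char_ranges
-- ===== SOURCE B (Python) =====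
-- def _get_char_ranges(ranges: list[str], delimiter: str, current_pos: int = 0) -> list[list[int]]:
--     # Build a prefix-offset table of segment start positions, then pair it with the segments.
--     offsets = [current_pos]
--     for r in ranges:
--         offsets.append(offsets[-1] + len(r) + len(delimiter))
--     return [[off, off + len(r)] for off, r in zip(offsets, ranges)]
-- ===== Notes on version B (the rewrite author's own statement) =====
-- stated objective: alternative
-- what changed: Replaces the single running-position loop that appends [start,end] pairs as it walks with a precomputed cumulative start-offset table followed by a separate zip pass that pairs each offset with its segment.
import Mathlib
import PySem

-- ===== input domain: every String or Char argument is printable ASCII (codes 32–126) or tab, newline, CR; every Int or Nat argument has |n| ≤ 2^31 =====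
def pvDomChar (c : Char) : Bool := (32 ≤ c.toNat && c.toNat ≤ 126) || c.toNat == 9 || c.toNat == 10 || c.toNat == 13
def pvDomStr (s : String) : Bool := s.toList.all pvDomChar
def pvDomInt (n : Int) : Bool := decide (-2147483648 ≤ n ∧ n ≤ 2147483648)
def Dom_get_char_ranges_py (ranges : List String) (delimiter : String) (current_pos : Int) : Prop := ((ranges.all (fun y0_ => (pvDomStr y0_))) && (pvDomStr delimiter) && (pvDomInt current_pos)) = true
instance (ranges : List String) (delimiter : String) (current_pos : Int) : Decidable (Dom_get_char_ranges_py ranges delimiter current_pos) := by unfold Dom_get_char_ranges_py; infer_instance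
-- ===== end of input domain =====

-- ===== PORT A =====
-- B builds a prefix-offset table then pairs offsets with segments, instead of A's
-- single running-position loop appending pairs as it walks (objective: alternative
-- decomposition, same O(n) cost).

-- port of A: one loop carrying (char_ranges, current_pos)
def get_char_ranges_py (ranges : List String) (delimiter : String) (current_pos : Int) : List (List Int) :=
  (ranges.foldl
    (fun (st : List (List Int) × Int) range_content =>
      let start_pos := st.2
      let end_pos := start_pos + PySem.Str.len range_content
      (st.1 ++ [[start_pos, end_pos]], end_pos + PySem.Str.len delimiter))
    ([], current_pos)).1

-- ===== PORT B =====
-- port of B: first the cumulative offsets table, then a zip-and-map pass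
def get_char_ranges_py_alt (ranges : List String) (delimiter : String) (current_pos : Int) : List (List Int) :=
  let offsets : List Int :=
    ranges.foldl
      (fun offs r => offs ++ [offs.getLast! + PySem.Str.len r + PySem.Str.len delimiter])
      [current_pos]
  (offsets.zip ranges).map (fun p => [p.1, p.1 + PySem.Str.len p.2])

-- ===== PRECONDITION & SPEC =====
def Spec_get_char_ranges_py (ranges : List String) (delimiter : String) (current_pos : Int) (out : List (List Int)) : Prop := out = get_char_ranges_py_alt ranges delimiter current_pos
instance (ranges : List String) (delimiter : String) (current_pos : Int) (out : List (List Int)) : Decidable (Spec_get_char_ranges_py ranges delimiter current_pos out) := by unfold Spec_get_char_ranges_py; infer_instance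

-- ===== CLAIM (what is proved, stated in full; the proofs are below) =====
def Claim_equal_get_char_ranges_py : Prop := ∀ (ranges : List String) (delimiter : String) (current_pos : Int), Dom_get_char_ranges_py ranges delimiter current_pos → Spec_get_char_ranges_py ranges delimiter current_pos (get_char_ranges_py ranges delimiter current_pos)

-- ===== LEMMAS AND PROOFS =====

-- common reference function: the [start, end] pairs, one per segment
def pvSegs (dl : Int) : List String → Int → List (List Int)
  | [], _ => []
  | r :: rs, pos => [pos, pos + PySem.Str.len r] :: pvSegs dl rs (pos + PySem.Str.len r + dl)

-- the tail of B's offsets table (all offsets after the first)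
def pvOffs (dl : Int) : List String → Int → List Int
  | [], _ => []
  | r :: rs, pos => (pos + PySem.Str.len r + dl) :: pvOffs dl rs (pos + PySem.Str.len r + dl)

theorem pvA_fold (delimiter : String) :
    ∀ (rs : List String) (acc : List (List Int)) (pos : Int),
      (rs.foldl
        (fun (st : List (List Int) × Int) range_content =>
          let start_pos := st.2
          let end_pos := start_pos + PySem.Str.len range_content
          (st.1 ++ [[start_pos, end_pos]], end_pos + PySem.Str.len delimiter))
        (acc, pos)).1 = acc ++ pvSegs (PySem.Str.len delimiter) rs pos := by
  intro rs
  induction rs with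
  | nil => intro acc pos; simp [pvSegs]
  | cons r rs ih =>
      intro acc pos
      simp only [List.foldl_cons, pvSegs]
      rw [ih]
      simp

theorem pvB_fold (delimiter : String) :
    ∀ (rs : List String) (init : List Int) (pos : Int),
      rs.foldl
        (fun offs r => offs ++ [offs.getLast! + PySem.Str.len r + PySem.Str.len delimiter])
        (init ++ [pos])
      = (init ++ [pos]) ++ pvOffs (PySem.Str.len delimiter) rs pos := by
  intro rs
  induction rs with
  | nil => intro init pos; simp [pvOffs]
  | cons r rs ih =>
      intro init pos
      simp only [List.foldl_cons]
      have hlast : (init ++ [pos]).getLast! = pos := by simp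
      rw [hlast]
      have := ih (init ++ [pos]) (pos + PySem.Str.len r + PySem.Str.len delimiter)
      simp only [List.append_assoc] at this ⊢
      rw [this]
      simp [pvOffs]

theorem pvB_zip (delimiter : String) :
    ∀ (rs : List String) (pos : Int),
      ((pos :: pvOffs (PySem.Str.len delimiter) rs pos).zip rs).map
        (fun p => [p.1, p.1 + PySem.Str.len p.2])
      = pvSegs (PySem.Str.len delimiter) rs pos := by
  intro rs
  induction rs with
  | nil => intro pos; simp [pvSegs]
  | cons r rs ih =>
      intro pos
      simp only [pvOffs, pvSegs, List.zip_cons_cons, List.map_cons]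
      rw [ih]

-- ===== VERDICT (by name: the statement is the Claim_ definition above) =====
theorem get_char_ranges_py_spec : Claim_equal_get_char_ranges_py := by
  intro ranges delimiter current_pos _
  unfold Spec_get_char_ranges_py get_char_ranges_py get_char_ranges_py_alt
  rw [pvA_fold]
  have hB := pvB_fold delimiter ranges [] current_pos
  simp only [List.nil_append] at hB
  rw [hB]
  simp only [List.singleton_append, pvB_zip, List.nil_append]
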